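-- pv_equiv track=rewrite | github.com/bu-bu-xxx/leetcode-python-code | 竞赛/第 327 场周赛/Q3_1.py | isItPossible
-- ===== SOURCE A (Python) =====
-- import collections
--
-- def isItPossible(word1: str, word2: str) -> bool:
--     dict1 = collections.Counter(word1)
--     dict2 = collections.Counter(word2)
--     for x, num1 in dict1.items():
--         for y, num2 in dict2.items():
--             if x == y and len(dict1) == len(dict2):
--                 return True
--             if x != y and (len(dict1) - (dict1[x] == 1) + (dict1[y] == 0)) == \
--                     (len(dict2) - (dict2[y] == 1) + (dict2[x] == 0)):
--                 return True
--     return False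
-- ===== SOURCE B (Python) =====
-- def isItPossible(word1: str, word2: str) -> bool:
--     c1 = {}
--     for ch in word1:
--         c1[ch] = c1.get(ch, 0) + 1
--     c2 = {}
--     for ch in word2:
--         c2[ch] = c2.get(ch, 0) + 1
--     d1, d2 = len(c1), len(c2)
--     if d1 == d2 and any(ch in c2 for ch in c1):
--         return True
--     # bucket each present letter by the contribution its swap makes to the distinct-count balance
--     bx = [[], [], []]
--     for x in c1:
--         bx[(c1[x] == 1) + (x not in c2)].append(x)
--     by = [[], [], []]
--     for y in c2:
--         by[(y not in c1) + (c2[y] == 1)].append(y)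
--     for t1 in range(3):
--         for t2 in range(3):
--             if d1 - t1 != d2 - t2:
--                 continue
--             xs, ys = bx[t1], by[t2]
--             if not xs or not ys:
--                 continue
--             if len(xs) > 1 or len(ys) > 1 or xs[0] != ys[0]:
--                 return True
--     return False
-- ===== Notes on version B (the rewrite author's own statement) =====
-- stated objective: alternative
-- what changed: A compares every distinct letter of word1 against every distinct letter of word2; B handles the same-letter swap as one set-intersection test and, for distinct swaps, buckets each present letter by its {0,1,2}-valued contribution to the distinct-count balance and checks the constant number of bucket pairs whose contributions cancel.
import Mathlib
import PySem

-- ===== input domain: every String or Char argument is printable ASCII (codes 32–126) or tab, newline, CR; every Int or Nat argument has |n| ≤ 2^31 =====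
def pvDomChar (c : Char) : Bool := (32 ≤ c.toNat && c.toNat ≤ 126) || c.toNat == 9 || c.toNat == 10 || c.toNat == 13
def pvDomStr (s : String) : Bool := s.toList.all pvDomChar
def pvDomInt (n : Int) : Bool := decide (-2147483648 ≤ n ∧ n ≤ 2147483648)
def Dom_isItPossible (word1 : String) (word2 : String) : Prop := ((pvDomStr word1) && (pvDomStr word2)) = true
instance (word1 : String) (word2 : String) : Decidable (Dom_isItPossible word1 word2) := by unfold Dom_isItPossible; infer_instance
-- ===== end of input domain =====

-- B replaces A's all-pairs scan over distinct letters by a constant-size bucket analysis of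
-- each letter's contribution to the distinct-count balance (objective: alternative).

-- ===== PORT A =====
def isItPossible (word1 : String) (word2 : String) : Bool :=
  let dict1 := PySem.Dict.counter word1.toList
  let dict2 := PySem.Dict.counter word2.toList
  dict1.items.any (fun p =>
    dict2.items.any (fun q =>
      (p.1 == q.1 && dict1.size == dict2.size) ||
      (p.1 != q.1 && decide (
        (dict1.size : Int) - (if dict1.getD p.1 0 = 1 then 1 else 0) + (if dict1.getD q.1 0 = 0 then 1 else 0)
        = (dict2.size : Int) - (if dict2.getD q.1 0 = 1 then 1 else 0) + (if dict2.getD p.1 0 = 0 then 1 else 0)))))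

-- ===== PORT B =====
-- B-side helpers: the three buckets b[0], b[1], b[2] of Source B as a triple of lists
def bucketAdd (b : List Char × List Char × List Char) (t : Int) (x : Char) :
    List Char × List Char × List Char :=
  if t = 0 then (b.1 ++ [x], b.2.1, b.2.2)
  else if t = 1 then (b.1, b.2.1 ++ [x], b.2.2)
  else (b.1, b.2.1, b.2.2 ++ [x])

def bucketGet (b : List Char × List Char × List Char) (t : Int) : List Char :=
  if t = 0 then b.1 else if t = 1 then b.2.1 else b.2.2

def isItPossible_alt (word1 : String) (word2 : String) : Bool :=
  let c1 := word1.toList.foldl (fun d ch => d.insert ch (d.getD ch 0 + 1)) (PySem.Dict.empty : PySem.Dict Char Int)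
  let c2 := word2.toList.foldl (fun d ch => d.insert ch (d.getD ch 0 + 1)) (PySem.Dict.empty : PySem.Dict Char Int)
  let d1 := c1.size
  let d2 := c2.size
  if d1 == d2 && c1.keys.any (fun ch => c2.contains ch) then true
  else
    let bx := c1.keys.foldl (fun b x =>
      bucketAdd b ((if c1.getD x 0 = 1 then 1 else 0) + (if c2.contains x then 0 else 1)) x)
      ([], [], [])
    let by_ := c2.keys.foldl (fun b y =>
      bucketAdd b ((if c1.contains y then 0 else 1) + (if c2.getD y 0 = 1 then 1 else 0)) y)
      ([], [], [])
    (PySem.List.pyRange 0 3 1).any (fun t1 =>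
      (PySem.List.pyRange 0 3 1).any (fun t2 =>
        if (d1 : Int) - t1 ≠ (d2 : Int) - t2 then false
        else
          if bucketGet bx t1 = [] ∨ bucketGet by_ t2 = [] then false
          else decide (1 < (bucketGet bx t1).length) || decide (1 < (bucketGet by_ t2).length) ||
               ((bucketGet bx t1).headD ' ' != (bucketGet by_ t2).headD ' ')))

-- ===== PRECONDITION & SPEC =====
def Spec_isItPossible (word1 : String) (word2 : String) (out : Bool) : Prop := out = isItPossible_alt word1 word2
instance (word1 : String) (word2 : String) (out : Bool) : Decidable (Spec_isItPossible word1 word2 out) := by unfold Spec_isItPossible; infer_instance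

-- ===== CLAIM (what is proved, stated in full; the proofs are below) =====
def Claim_equal_isItPossible : Prop := ∀ (word1 : String) (word2 : String), Dom_isItPossible word1 word2 → Spec_isItPossible word1 word2 (isItPossible word1 word2)

-- ===== LEMMAS AND PROOFS =====

-- the common value both programs compute: either a same-letter swap works (equal distinct
-- counts and a shared letter), or some x ≠ y with the right distinct-count balance exists
def fX (l1 l2 : List Char) (x : Char) : Int :=
  (if (l1.count x : Int) = 1 then 1 else 0) + (if x ∈ l2 then 0 else 1)

def fY (l1 l2 : List Char) (y : Char) : Int :=
  (if y ∈ l1 then 0 else 1) + (if (l2.count y : Int) = 1 then 1 else 0)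

def Q (l1 l2 : List Char) : Prop :=
  ((PySem.Set.ofList l1).length = (PySem.Set.ofList l2).length ∧ ∃ x ∈ l1, x ∈ l2) ∨
  ∃ x ∈ l1, ∃ y ∈ l2, x ≠ y ∧
    ((PySem.Set.ofList l1).length : Int) - fX l1 l2 x
      = ((PySem.Set.ofList l2).length : Int) - fY l1 l2 y

def bIdx (t : Int) : Int := if t = 0 then 0 else if t = 1 then 1 else 2

lemma size_counter (xs : List Char) :
    (PySem.Dict.counter xs).size = (PySem.Set.ofList xs).length := by
  rw [show (PySem.Dict.counter xs).size = (PySem.Dict.counter xs).items.length from rfl,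
    PySem.Dict.items_counter, List.length_map]

lemma contains_counter_iff (xs : List Char) (x : Char) :
    (PySem.Dict.counter xs).contains x = true ↔ x ∈ xs := by
  rw [PySem.Dict.contains_iff_mem_keys, PySem.Dict.keys_counter, PySem.Set.mem_ofList]

lemma indicator_zero (l : List Char) (x : Char) :
    (if (l.count x : Int) = 0 then (1 : Int) else 0) = (if x ∈ l then 0 else 1) := by
  by_cases h : x ∈ l
  · rw [if_neg (by simpa [List.count_eq_zero] using h), if_pos h]
  · rw [if_pos (by simp [List.count_eq_zero.mpr h]), if_neg h]

lemma arith_swap (d1 d2 a b c d : Int) :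
    d1 - a + b = d2 - c + d ↔ d1 - (a + d) = d2 - (b + c) := by omega

lemma bIdx_of_cases (u : Int) (h : u = 0 ∨ u = 1 ∨ u = 2) : bIdx u = u := by
  rcases h with rfl | rfl | rfl <;> decide

lemma bucketGet_add (b : List Char × List Char × List Char) (u : Int) (x : Char) (t : Int)
    (ht : t = 0 ∨ t = 1 ∨ t = 2) :
    bucketGet (bucketAdd b u x) t = bucketGet b t ++ (if bIdx u = t then [x] else []) := by
  rcases ht with rfl | rfl | rfl <;> by_cases hu0 : u = 0 <;> by_cases hu1 : u = 1 <;>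
    simp [bucketAdd, bucketGet, bIdx, hu0, hu1]

lemma bucketGet_foldl (f : Char → Int) (l : List Char) (b : List Char × List Char × List Char)
    (t : Int) (ht : t = 0 ∨ t = 1 ∨ t = 2) :
    bucketGet (l.foldl (fun acc x => bucketAdd acc (f x) x) b) t
      = bucketGet b t ++ l.filter (fun x => bIdx (f x) == t) := by
  induction l generalizing b with
  | nil => simp
  | cons x xs ih =>
      rw [List.foldl_cons, ih, bucketGet_add _ _ _ _ ht, List.filter_cons, List.append_assoc]
      by_cases h : bIdx (f x) = t <;> simp [h]

lemma exists_ne_of_lists (xs ys : List Char) (hx : xs.Nodup) (hy : ys.Nodup) :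
    (∃ a ∈ xs, ∃ b ∈ ys, a ≠ b) ↔
      xs ≠ [] ∧ ys ≠ [] ∧ (1 < xs.length ∨ 1 < ys.length ∨ xs.headD ' ' ≠ ys.headD ' ') := by
  rcases xs with _ | ⟨x0, xt⟩
  · simp
  rcases ys with _ | ⟨y0, yt⟩
  · simp
  constructor
  · rintro ⟨a, ha, b, hb, hab⟩
    refine ⟨by simp, by simp, ?_⟩
    by_contra hcon
    push Not at hcon
    obtain ⟨h1, h2, h3⟩ := hcon
    have hxt : xt = [] := by
      rcases xt with _ | ⟨u, v⟩
      · rfl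
      · exfalso; simp [List.length_cons] at h1
    have hyt : yt = [] := by
      rcases yt with _ | ⟨u, v⟩
      · rfl
      · exfalso; simp [List.length_cons] at h2
    subst hxt; subst hyt
    simp only [List.mem_singleton] at ha hb
    simp only [List.headD_cons] at h3
    exact hab (ha.trans (h3.trans hb.symm))
  · rintro ⟨-, -, h | h | h⟩
    · rcases xt with _ | ⟨x1, xt'⟩
      · simp at h
      · have hne : x0 ≠ x1 := by
          rw [List.nodup_cons] at hx
          exact fun he => hx.1 (he ▸ List.mem_cons_self ..)
        by_cases hb : x0 = y0
        · exact ⟨x1, by simp, y0, by simp, fun he => hne (hb.trans he.symm)⟩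
        · exact ⟨x0, by simp, y0, by simp, hb⟩
    · rcases yt with _ | ⟨y1, yt'⟩
      · simp at h
      · have hne : y0 ≠ y1 := by
          rw [List.nodup_cons] at hy
          exact fun he => hy.1 (he ▸ List.mem_cons_self ..)
        by_cases hb : x0 = y0
        · exact ⟨x0, by simp, y1, by simp, fun he => hne (hb.symm.trans he)⟩
        · exact ⟨x0, by simp, y0, by simp, hb⟩
    · exact ⟨x0, by simp, y0, by simp, by simpa using h⟩

lemma rest_iff (S1 S2 : List Char) (f g : Char → Int) (nd1 : S1.Nodup) (nd2 : S2.Nodup)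
    (hf : ∀ x, f x = 0 ∨ f x = 1 ∨ f x = 2) (hg : ∀ y, g y = 0 ∨ g y = 1 ∨ g y = 2)
    (d1 d2 : Int) :
    ((PySem.List.pyRange 0 3 1).any (fun t1 =>
      (PySem.List.pyRange 0 3 1).any (fun t2 =>
        if d1 - t1 ≠ d2 - t2 then false
        else
          if bucketGet (S1.foldl (fun b x => bucketAdd b (f x) x) ([], [], [])) t1 = [] ∨
             bucketGet (S2.foldl (fun b y => bucketAdd b (g y) y) ([], [], [])) t2 = [] then false
          else decide (1 < (bucketGet (S1.foldl (fun b x => bucketAdd b (f x) x) ([], [], [])) t1).length) ||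
               decide (1 < (bucketGet (S2.foldl (fun b y => bucketAdd b (g y) y) ([], [], [])) t2).length) ||
               ((bucketGet (S1.foldl (fun b x => bucketAdd b (f x) x) ([], [], [])) t1).headD ' ' !=
                (bucketGet (S2.foldl (fun b y => bucketAdd b (g y) y) ([], [], [])) t2).headD ' ')))) = true
    ↔ ∃ x ∈ S1, ∃ y ∈ S2, x ≠ y ∧ d1 - f x = d2 - g y := by
  constructor
  · intro hrest
    rw [List.any_eq_true] at hrest
    obtain ⟨t1, ht1m, hrest⟩ := hrest
    rw [List.any_eq_true] at hrest
    obtain ⟨t2, ht2m, hbody⟩ := hrest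
    rw [PySem.List.mem_pyRange_one] at ht1m ht2m
    have ht1 : t1 = 0 ∨ t1 = 1 ∨ t1 = 2 := by omega
    have ht2 : t2 = 0 ∨ t2 = 1 ∨ t2 = 2 := by omega
    by_cases hdt : d1 - t1 ≠ d2 - t2
    · rw [if_pos hdt] at hbody; exact absurd hbody (by simp)
    · rw [if_neg hdt] at hbody
      push Not at hdt
      rw [bucketGet_foldl f S1 _ t1 ht1, bucketGet_foldl g S2 _ t2 ht2] at hbody
      simp only [bucketGet, ite_self, List.nil_append] at hbody
      by_cases hemp : S1.filter (fun x => bIdx (f x) == t1) = [] ∨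
                      S2.filter (fun y => bIdx (g y) == t2) = []
      · rw [if_pos hemp] at hbody; exact absurd hbody (by simp)
      · rw [if_neg hemp] at hbody
        push Not at hemp
        simp only [Bool.or_eq_true, decide_eq_true_eq, bne_iff_ne] at hbody
        rw [or_assoc] at hbody
        obtain ⟨a, haf, b, hbf, hab⟩ :=
          (exists_ne_of_lists _ _ (nd1.filter _) (nd2.filter _)).mpr ⟨hemp.1, hemp.2, hbody⟩
        obtain ⟨ha1, ha2⟩ := List.mem_filter.mp haf
        obtain ⟨hb1, hb2⟩ := List.mem_filter.mp hbf
        have hfa : f a = t1 := by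
          have := of_decide_eq_true ha2; rwa [bIdx_of_cases _ (hf a)] at this
        have hgb : g b = t2 := by
          have := of_decide_eq_true hb2; rwa [bIdx_of_cases _ (hg b)] at this
        exact ⟨a, ha1, b, hb1, hab, by rw [hfa, hgb]; exact hdt⟩
  · rintro ⟨x, hx, y, hy, hxy, heq⟩
    rw [List.any_eq_true]
    refine ⟨f x, PySem.List.mem_pyRange_one.mpr (by rcases hf x with h | h | h <;> omega), ?_⟩
    rw [List.any_eq_true]
    refine ⟨g y, PySem.List.mem_pyRange_one.mpr (by rcases hg y with h | h | h <;> omega), ?_⟩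
    rw [if_neg (fun h => h heq)]
    rw [bucketGet_foldl f S1 _ (f x) (hf x), bucketGet_foldl g S2 _ (g y) (hg y)]
    simp only [bucketGet, ite_self, List.nil_append]
    have hxf : x ∈ S1.filter (fun z => bIdx (f z) == f x) :=
      List.mem_filter.mpr ⟨hx, by rw [bIdx_of_cases _ (hf x)]; exact beq_self_eq_true _⟩
    have hyf : y ∈ S2.filter (fun z => bIdx (g z) == g y) :=
      List.mem_filter.mpr ⟨hy, by rw [bIdx_of_cases _ (hg y)]; exact beq_self_eq_true _⟩
    obtain ⟨he1, he2, h3⟩ :=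
      (exists_ne_of_lists _ _ (nd1.filter _) (nd2.filter _)).mp ⟨x, hxf, y, hyf, hxy⟩
    rw [if_neg (by rintro (h | h); exact he1 h; exact he2 h)]
    simp only [Bool.or_eq_true, decide_eq_true_eq, bne_iff_ne]
    exact or_assoc.mpr h3

lemma A_iff (w1 w2 : String) : isItPossible w1 w2 = true ↔ Q w1.toList w2.toList := by
  unfold isItPossible Q
  simp only [List.any_eq_true, PySem.Dict.items_counter, List.mem_map, PySem.Dict.getD_counter,
    size_counter, PySem.Set.mem_ofList, Bool.or_eq_true, Bool.and_eq_true, beq_iff_eq,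
    bne_iff_ne, decide_eq_true_eq, exists_exists_and_eq_and]
  constructor
  · rintro ⟨x, hx, y, hy, hcase⟩
    rcases hcase with ⟨rfl, hlen⟩ | ⟨hne, heq⟩
    · exact Or.inl ⟨hlen, x, hx, hy⟩
    · refine Or.inr ⟨x, hx, y, hy, hne, ?_⟩
      unfold fX fY
      rw [indicator_zero, indicator_zero] at heq
      exact (arith_swap _ _ _ _ _ _).mp heq
  · rintro (⟨hlen, x, hx1, hx2⟩ | ⟨x, hx, y, hy, hne, heq⟩)
    · exact ⟨x, hx1, x, hx2, Or.inl ⟨rfl, hlen⟩⟩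
    · refine ⟨x, hx, y, hy, Or.inr ⟨hne, ?_⟩⟩
      rw [indicator_zero, indicator_zero]
      unfold fX fY at heq
      exact (arith_swap _ _ _ _ _ _).mpr heq

lemma B_iff (w1 w2 : String) : isItPossible_alt w1 w2 = true ↔ Q w1.toList w2.toList := by
  unfold isItPossible_alt
  simp only [PySem.Dict.foldl_insert_getD_add_one_eq_counter]
  simp only [size_counter, PySem.Dict.getD_counter, contains_counter_iff, PySem.Dict.keys_counter]
  split_ifs with hc
  · simp only [Bool.and_eq_true, beq_iff_eq, List.any_eq_true, PySem.Set.mem_ofList,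
      contains_counter_iff] at hc
    obtain ⟨hlen, x, hx1, hx2⟩ := hc
    exact iff_of_true rfl (Or.inl ⟨hlen, x, hx1, hx2⟩)
  · have hL : ¬(((PySem.Set.ofList w1.toList).length = (PySem.Set.ofList w2.toList).length) ∧
        ∃ x ∈ w1.toList, x ∈ w2.toList) := by
      rintro ⟨h1, x, hx1, hx2⟩
      exact hc (by
        simp only [Bool.and_eq_true, beq_iff_eq, List.any_eq_true, PySem.Set.mem_ofList,
          contains_counter_iff]
        exact ⟨h1, x, hx1, hx2⟩)
    rw [rest_iff (PySem.Set.ofList w1.toList) (PySem.Set.ofList w2.toList)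
      (fun x => (if (w1.toList.count x : Int) = 1 then 1 else 0) + (if x ∈ w2.toList then 0 else 1))
      (fun y => (if y ∈ w1.toList then 0 else 1) + (if (w2.toList.count y : Int) = 1 then 1 else 0))
      (PySem.Set.nodup_ofList _) (PySem.Set.nodup_ofList _)
      (fun x => by dsimp only; split_ifs <;> norm_num)
      (fun y => by dsimp only; split_ifs <;> norm_num)
      ((PySem.Set.ofList w1.toList).length : Int) ((PySem.Set.ofList w2.toList).length : Int)]
    unfold Q fX fY
    simp only [PySem.Set.mem_ofList]
    constructor
    · exact fun h => Or.inr h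
    · rintro (hl | hr)
      · exact absurd hl hL
      · exact hr

-- ===== VERDICT (by name: the statement is the Claim_ definition above) =====
theorem isItPossible_spec : Claim_equal_isItPossible := by
  intro w1 w2 _
  unfold Spec_isItPossible
  rw [Bool.eq_iff_iff, A_iff, B_iff]
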